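-- pv_equiv track=rewrite | github.com/kk98033/UVa-Python | .history/828_20230525133204.py | decipher_message
-- ===== SOURCE A (Python) =====
-- def decipher_message(alphabetical_key, numerical_key, message):
--     decrypted_message = ""
--     m = 1
--     l = len(alphabetical_key)
--
--     for letter in message:
--         if letter in alphabetical_key:
--             index = alphabetical_key.index(letter)
--             c = chr((index + numerical_key) % l + ord('A'))
--             decrypted_message += alphabetical_key[(index + m) % l] + c + alphabetical_key[(index + m + 1) % l]
--             m += 1
--         elif letter == ' ':
--             decrypted_message += ' '
--             m = 1
--         else:
--             return "error in encryption"
--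
--     return decrypted_message
-- ===== SOURCE B (Python) =====
-- def decipher_message(alphabetical_key, numerical_key, message):
--     l = len(alphabetical_key)
--     decoded = []
--     for word in message.split(' '):
--         blocks = []
--         for m, letter in enumerate(word, 1):
--             index = alphabetical_key.find(letter)
--             if index < 0:
--                 return "error in encryption"
--             blocks.append(alphabetical_key[(index + m) % l]
--                           + chr((index + numerical_key) % l + ord('A'))
--                           + alphabetical_key[(index + m + 1) % l])
--         decoded.append(''.join(blocks))
--     return ' '.join(decoded)
-- ===== Notes on version B (the rewrite author's own statement) =====
-- stated objective: alternative
-- what changed: A's single flat loop with manually-reset counter state is replaced by splitting the message on spaces and decoding each word with a local per-word counter, joining the decoded words with spaces.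
-- outside the precondition, e.g. on decipher_message(' ab', 1, 'a b'): A returns 'bC bB bA ', B returns 'bC   Aa'
import Mathlib
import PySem

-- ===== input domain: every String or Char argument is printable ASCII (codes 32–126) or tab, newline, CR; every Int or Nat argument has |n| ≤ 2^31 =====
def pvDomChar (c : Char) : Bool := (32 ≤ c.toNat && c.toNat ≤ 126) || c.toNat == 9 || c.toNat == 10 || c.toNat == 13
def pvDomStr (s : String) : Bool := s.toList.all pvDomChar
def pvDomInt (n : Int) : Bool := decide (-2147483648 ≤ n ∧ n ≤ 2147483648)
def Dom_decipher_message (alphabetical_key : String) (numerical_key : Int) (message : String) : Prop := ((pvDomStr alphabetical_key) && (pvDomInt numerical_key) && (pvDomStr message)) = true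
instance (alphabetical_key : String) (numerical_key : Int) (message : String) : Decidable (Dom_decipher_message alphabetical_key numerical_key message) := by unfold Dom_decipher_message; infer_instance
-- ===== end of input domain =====

-- B replaces A's flat loop with manual counter resets by split-on-space / decode-each-word / join (objective: alternative decomposition).

-- ===== PORT A =====
-- the three-character block A appends for a key letter at position `index` with counter `m`
def pvABlock (key : List Char) (numerical_key : Int) (index : Int) (m : Int) : List Char :=
  let l : Int := (key.length : Int)
  [(PySem.List.pyGet? key (PySem.Int.mod (index + m) l)).getD 'A',
   Char.ofNat ((PySem.Int.mod (index + numerical_key) l).toNat + 65),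
   (PySem.List.pyGet? key (PySem.Int.mod (index + m + 1) l)).getD 'A']

-- A's single loop over the message, carrying the accumulated string and the counter m
def pvALoop (key : List Char) (numerical_key : Int) : List Char → List Char → Int → String
  | [], acc, _ => String.mk acc
  | letter :: rest, acc, m =>
    if key.contains letter then
      -- `alphabetical_key.index(letter)`: membership guarantees the index exists
      let index : Int := (((PySem.List.index? key letter).getD 0 : Nat) : Int)
      pvALoop key numerical_key rest (acc ++ pvABlock key numerical_key index m) (m + 1)
    else if letter = ' ' then
      pvALoop key numerical_key rest (acc ++ [' ']) 1
    else
      "error in encryption"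

def decipher_message (alphabetical_key : String) (numerical_key : Int) (message : String) : String :=
  pvALoop alphabetical_key.toList numerical_key message.toList [] 1

-- ===== PORT B =====
-- `alphabetical_key.find(letter)` for a single character: first index, -1 if absent (exact)
def pvBFind (key : List Char) (letter : Char) : Int :=
  match PySem.List.index? key letter with
  | some i => (i : Int)
  | none => -1

-- `message.split(' ')`: split on every single space, empty pieces kept (exact for a 1-char sep)
def pvSplitSp : List Char → List (List Char)
  | [] => [[]]
  | c :: rest =>
    if c = ' ' then [] :: pvSplitSp rest
    else
      match pvSplitSp rest with
      | [] => [[c]]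
      | w :: ws => (c :: w) :: ws

-- `' '.join(decoded)`
def pvJoinSp : List (List Char) → List Char
  | [] => []
  | [w] => w
  | w :: ws => w ++ ' ' :: pvJoinSp ws

-- inner loop of B: decode one word, counter m starting at 1; none = early return "error in encryption"
def pvBWord (key : List Char) (numerical_key : Int) : List Char → Int → Option (List Char)
  | [], _ => some []
  | letter :: rest, m =>
    let index := pvBFind key letter
    if index < 0 then none
    else
      let l : Int := (key.length : Int)
      let block : List Char :=
        [(PySem.List.pyGet? key (PySem.Int.mod (index + m) l)).getD 'A',
         Char.ofNat ((PySem.Int.mod (index + numerical_key) l).toNat + 65),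
         (PySem.List.pyGet? key (PySem.Int.mod (index + m + 1) l)).getD 'A']
      (pvBWord key numerical_key rest (m + 1)).map (fun tail => block ++ tail)

-- outer loop of B: decode each word, propagating the early error return
def pvBWords (key : List Char) (numerical_key : Int) : List (List Char) → Option (List (List Char))
  | [] => some []
  | w :: ws =>
    match pvBWord key numerical_key w 1 with
    | none => none
    | some d => (pvBWords key numerical_key ws).map (d :: ·)

def decipher_message_alt (alphabetical_key : String) (numerical_key : Int) (message : String) : String :=
  match pvBWords alphabetical_key.toList numerical_key (pvSplitSp message.toList) with
  | none => "error in encryption"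
  | some ds => String.mk (pvJoinSp ds)

-- ===== PRECONDITION & SPEC =====
-- Pre_ excludes inputs whose key AND message both contain a space: there A still returns a value,
-- but whether a message space is a cipher symbol (A's branch order) or a word separator is an
-- accidental corner of a degenerate key, and B's split-on-space reading is as defensible as A's.
def Pre_decipher_message (alphabetical_key : String) (numerical_key : Int) (message : String) : Prop :=
  ' ' ∉ alphabetical_key.toList ∨ ' ' ∉ message.toList
instance (alphabetical_key : String) (numerical_key : Int) (message : String) : Decidable (Pre_decipher_message alphabetical_key numerical_key message) := by unfold Pre_decipher_message; infer_instance

def pvWitness_decipher_message : String × Int × String := ("ABCDE", 2, "AB CD")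

def Spec_decipher_message (alphabetical_key : String) (numerical_key : Int) (message : String) (out : String) : Prop := out = decipher_message_alt alphabetical_key numerical_key message
instance (alphabetical_key : String) (numerical_key : Int) (message : String) (out : String) : Decidable (Spec_decipher_message alphabetical_key numerical_key message out) := by unfold Spec_decipher_message; infer_instance

-- ===== CLAIM (what is proved, stated in full; the proofs are below) =====
def Claim_equal_decipher_message : Prop := ∀ (alphabetical_key : String) (numerical_key : Int) (message : String), Dom_decipher_message alphabetical_key numerical_key message → Pre_decipher_message alphabetical_key numerical_key message → Spec_decipher_message alphabetical_key numerical_key message (decipher_message alphabetical_key numerical_key message)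

-- ===== LEMMAS AND PROOFS =====

theorem pvSplitSp_ne_nil (cs : List Char) : pvSplitSp cs ≠ [] := by
  cases cs with
  | nil => simp [pvSplitSp]
  | cons c rest =>
    simp only [pvSplitSp]
    split
    · simp
    · cases h : pvSplitSp rest <;> simp

-- B restricted to the tail after a space: first word restarts at m = 1
def pvBFrom (key : List Char) (numerical_key : Int) (msg : List Char) (m : Int) : Option (List (List Char)) :=
  match pvSplitSp msg with
  | [] => some []
  | w :: ws =>
    match pvBWord key numerical_key w m with
    | none => none
    | some d => (pvBWords key numerical_key ws).map (d :: ·)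

theorem pvBFrom_one (key : List Char) (nk : Int) (msg : List Char) :
    pvBFrom key nk msg 1 = pvBWords key nk (pvSplitSp msg) := by
  unfold pvBFrom
  cases h : pvSplitSp msg with
  | nil => exact absurd h (pvSplitSp_ne_nil msg)
  | cons w ws => simp [pvBWords]

theorem pvJoinSp_cons_nil (d : List Char) (ds : List (List Char)) (hds : ds ≠ []) :
    pvJoinSp ([] :: ds) = ' ' :: pvJoinSp ds := by
  cases ds with
  | nil => exact absurd rfl hds
  | cons a as => rfl

theorem pvMain (key : List Char) (nk : Int) :
    ∀ (msg : List Char) (m : Int) (acc : List Char), (' ' ∉ key ∨ ' ' ∉ msg) →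
      pvALoop key nk msg acc m =
        match pvBFrom key nk msg m with
        | none => "error in encryption"
        | some ds => String.mk (acc ++ pvJoinSp ds) := by
  intro msg
  induction msg with
  | nil =>
    intro m acc _
    simp [pvALoop, pvBFrom, pvSplitSp, pvBWord, pvBWords, pvJoinSp]
  | cons c rest ih =>
    intro m acc h
    have hrest : ' ' ∉ key ∨ ' ' ∉ rest := by
      rcases h with hl | hr
      · exact Or.inl hl
      · exact Or.inr fun hm => hr (List.mem_cons_of_mem c hm)
    by_cases hc : key.contains c
    · -- key letter branch
      have hmem : c ∈ key := by simpa using hc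
      have hne : ¬ c = ' ' := by
        rcases h with hl | hr
        · exact fun hcs => hl (hcs ▸ hmem)
        · exact fun hcs => hr (hcs ▸ List.mem_cons_self)
      obtain ⟨i, hi⟩ : ∃ i, PySem.List.index? key c = some i := by
        have := (PySem.List.index?_isSome_iff (xs := key) (v := c)).2 hmem
        exact Option.isSome_iff_exists.mp this
      have hi' : List.idxOf? c key = some i := by simpa using hi
      have hfind : pvBFind key c = (i : Int) := by simp [pvBFind, hi']
      -- reduce left side
      have hL : pvALoop key nk (c :: rest) acc m =
          pvALoop key nk rest (acc ++ pvABlock key nk (i : Int) m) (m + 1) := by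
        simp [pvALoop, hmem, hi']
      rw [hL, ih (m + 1) (acc ++ pvABlock key nk (i : Int) m) hrest]
      -- reduce right side
      cases hsr : pvSplitSp rest with
      | nil => exact absurd hsr (pvSplitSp_ne_nil rest)
      | cons w ws =>
        have hnotlt : ¬ ((i : Int) < 0) := Int.not_lt.mpr (Int.natCast_nonneg i)
        have hsc : pvSplitSp (c :: rest) = (c :: w) :: ws := by
          simp [pvSplitSp, hne, hsr]
        have hblock : pvABlock key nk (i : Int) m =
            [(PySem.List.pyGet? key (PySem.Int.mod ((i : Int) + m) (key.length : Int))).getD 'A',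
             Char.ofNat ((PySem.Int.mod ((i : Int) + nk) (key.length : Int)).toNat + 65),
             (PySem.List.pyGet? key (PySem.Int.mod ((i : Int) + m + 1) (key.length : Int))).getD 'A'] := rfl
        simp only [pvBFrom, hsc, hsr, pvBWord, hfind, hnotlt, if_false]
        cases hw : pvBWord key nk w (m + 1) with
        | none => simp
        | some d =>
          cases hws : pvBWords key nk ws with
          | none => simp
          | some ds =>
            simp only [Option.map_some]
            have hjoin : pvJoinSp ((pvABlock key nk (i : Int) m ++ d) :: ds)
                = pvABlock key nk (i : Int) m ++ pvJoinSp (d :: ds) := by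
              cases ds with
              | nil => simp [pvJoinSp]
              | cons a as => simp [pvJoinSp]
            rw [← hblock, hjoin]
            simp [List.append_assoc]
    · by_cases hspace : c = ' '
      · -- space branch: counter resets
        subst hspace
        have hkey : ' ' ∉ key := by
          rcases h with hl | hr
          · exact hl
          · exact absurd List.mem_cons_self hr
        have hL : pvALoop key nk (' ' :: rest) acc m =
            pvALoop key nk rest (acc ++ [' ']) 1 := by
          simp [pvALoop, hkey]
        rw [hL, ih 1 (acc ++ [' ']) (Or.inl hkey), pvBFrom_one]
        have hsc : pvSplitSp (' ' :: rest) = [] :: pvSplitSp rest := by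
          simp [pvSplitSp]
        cases hsr : pvSplitSp rest with
        | nil => exact absurd hsr (pvSplitSp_ne_nil rest)
        | cons w ws =>
          simp only [pvBFrom, hsc, hsr, pvBWord]
          cases hw : pvBWord key nk w 1 with
          | none => simp [pvBWords, hw]
          | some d =>
            cases hws : pvBWords key nk ws with
            | none => simp [pvBWords, hw, hws]
            | some ds =>
              simp only [pvBWords, hw, hws, Option.map_some]
              rw [pvJoinSp_cons_nil (d := d) (ds := d :: ds) (by simp)]
              simp
      · -- error branch
        have hnot : c ∉ key := by simpa using hc
        have hfind : pvBFind key c = -1 := by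
          have hi0 : List.idxOf? c key = none := by
            simpa using (PySem.List.index?_eq_none_iff (xs := key) (v := c)).2 hnot
          simp [pvBFind, hi0]
        have hL : pvALoop key nk (c :: rest) acc m = "error in encryption" := by
          simp [pvALoop, hnot, hspace]
        cases hsr : pvSplitSp rest with
        | nil => exact absurd hsr (pvSplitSp_ne_nil rest)
        | cons w ws =>
          have hsc : pvSplitSp (c :: rest) = (c :: w) :: ws := by
            simp [pvSplitSp, hspace, hsr]
          simp [hL, pvBFrom, hsc, pvBWord, hfind]

-- ===== VERDICT (by name: the statement is the Claim_ definition above) =====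
theorem decipher_message_spec : Claim_equal_decipher_message := by
  intro key nk msg _ hpre
  unfold Spec_decipher_message decipher_message decipher_message_alt
  rw [pvMain key.toList nk msg.toList 1 [] hpre, pvBFrom_one]
  cases pvBWords key.toList nk (pvSplitSp msg.toList) <;> simp
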